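-- pv_equiv track=rewrite | github.com/Byeonjinha/codingTest | 프로그래머스/unrated/133499. 옹알이 （2）/옹알이 （2）.py | checkBabbling
-- ===== SOURCE A (Python) =====
-- def checkBabbling(word, previousWord):
--     while word[:3] == "aya" and previousWord != "aya" or word[:2] == "ye"  and previousWord != "ye" or word[:3] == "woo"  and previousWord != "woo" or word[:2] == "ma"  and previousWord != "ma":
--         if word[:3] == "aya" and previousWord != "aya":
--             previousWord = "aya"
--             word =  word.replace("aya", "", 1)
--             checkBabbling(word, "aya")
--         elif word[:2] == "ye"  and previousWord != "ye":
--             previousWord = "ye"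
--             word =  word.replace("ye", "", 1)
--             checkBabbling(word, "ye")
--         elif word[:3] == "woo"  and previousWord != "woo":
--             previousWord = "woo"
--             word = word.replace("woo", "", 1)
--             checkBabbling(word, "woo")
--         elif word[:2] == "ma"  and previousWord != "ma":
--             previousWord = "ma"
--             word = word.replace("ma", "", 1)
--             checkBabbling(word, "ma")
--     if len(word) == 0 :
--         return 1
--     return 0
-- ===== SOURCE B (Python) =====
-- def checkBabbling(word, previousWord):
--     # Two-phase: tokenize greedily first, then validate repetition / previousWord.
--     toks = ("aya", "ye", "woo", "ma")
--     seq = []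
--     i = 0
--     while i < len(word):
--         for t in toks:
--             if word.startswith(t, i):
--                 seq.append(t)
--                 i += len(t)
--                 break
--         else:
--             return 0
--     if any(x == y for x, y in zip(seq, seq[1:])):
--         return 0
--     if seq and seq[0] == previousWord:
--         return 0
--     return 1
-- ===== Notes on version B (the rewrite author's own statement) =====
-- stated objective: simpler
-- what changed: Replaces A's in-place while-loop that interleaves stripping with the repetition/previousWord checks (and makes discarded exponential recursive self-calls) by a two-phase recognizer: greedily tokenize the whole word first, then reject adjacent duplicate tokens or a first token equal to previousWord.
import Mathlib
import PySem

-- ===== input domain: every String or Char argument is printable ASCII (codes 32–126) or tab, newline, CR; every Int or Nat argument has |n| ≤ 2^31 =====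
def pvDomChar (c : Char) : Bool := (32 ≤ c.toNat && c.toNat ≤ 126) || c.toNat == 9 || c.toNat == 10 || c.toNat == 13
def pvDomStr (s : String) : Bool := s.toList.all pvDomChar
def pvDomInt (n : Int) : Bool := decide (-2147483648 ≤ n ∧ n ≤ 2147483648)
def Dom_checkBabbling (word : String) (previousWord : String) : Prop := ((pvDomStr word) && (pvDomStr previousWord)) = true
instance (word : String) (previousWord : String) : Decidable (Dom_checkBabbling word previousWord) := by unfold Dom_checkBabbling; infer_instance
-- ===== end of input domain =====

-- B replaces A's strip-while-checking loop (whose discarded recursive self-calls it drops as dead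
-- code) by a two-phase recognizer: tokenize greedily first, then validate repetition/previousWord.

-- ===== PORT A =====
def pvReplace1 : List Char → List Char → List Char
  | [], _ => []
  | c :: rest, old =>
      if old.isPrefixOf (c :: rest) then (c :: rest).drop old.length
      else c :: pvReplace1 rest old

theorem pvReplace1_lt (w old : List Char) (hne : 0 < old.length) (hocc : old.isPrefixOf w = true) :
    (pvReplace1 w old).length < w.length := by
  cases w with
  | nil =>
    cases old with
    | nil => simp at hne
    | cons d ds => simp [List.isPrefixOf] at hocc
  | cons c rest =>
    simp only [pvReplace1, hocc, if_true]
    simp only [List.length_drop, List.length_cons]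
    omega

theorem pv_slice_take (w : List Char) (b : Int) (hb : 0 <= b) :
    PySem.List.slice w none (some b) = w.take b.toNat := PySem.List.slice_to w hb

def pvCondA (w : List Char) (prev : String) : Bool :=
  (PySem.List.slice w none (some 3) == "aya".toList && prev != "aya") ||
  (PySem.List.slice w none (some 2) == "ye".toList  && prev != "ye")  ||
  (PySem.List.slice w none (some 3) == "woo".toList && prev != "woo") ||
  (PySem.List.slice w none (some 2) == "ma".toList  && prev != "ma")

def pvLoopA (w : List Char) (prev : String) : List Char :=
  if pvCondA w prev then
    if _h1 : (PySem.List.slice w none (some 3) == "aya".toList && prev != "aya") then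
      pvLoopA (pvReplace1 w "aya".toList) "aya"
    else if _h2 : (PySem.List.slice w none (some 2) == "ye".toList && prev != "ye") then
      pvLoopA (pvReplace1 w "ye".toList) "ye"
    else if _h3 : (PySem.List.slice w none (some 3) == "woo".toList && prev != "woo") then
      pvLoopA (pvReplace1 w "woo".toList) "woo"
    else if _h4 : (PySem.List.slice w none (some 2) == "ma".toList && prev != "ma") then
      pvLoopA (pvReplace1 w "ma".toList) "ma"
    else w
  else w
termination_by w.length
decreasing_by
  · have hb : (PySem.List.slice w none (some 3) == "aya".toList) = true := by
      rcases hx : (PySem.List.slice w none (some 3) == "aya".toList) with _ | _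
      · rw [hx, Bool.false_and] at _h1; cases _h1
      · rfl
    have hsl := eq_of_beq hb
    rw [pv_slice_take w 3 (by norm_num)] at hsl
    have hpre : "aya".toList <+: w := List.prefix_iff_eq_take.mpr hsl.symm
    exact pvReplace1_lt w _ (by decide) (List.isPrefixOf_iff_prefix.mpr hpre)
  · have hb : (PySem.List.slice w none (some 2) == "ye".toList) = true := by
      rcases hx : (PySem.List.slice w none (some 2) == "ye".toList) with _ | _
      · rw [hx, Bool.false_and] at _h2; cases _h2
      · rfl
    have hsl := eq_of_beq hb
    rw [pv_slice_take w 2 (by norm_num)] at hsl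
    have hpre : "ye".toList <+: w := List.prefix_iff_eq_take.mpr hsl.symm
    exact pvReplace1_lt w _ (by decide) (List.isPrefixOf_iff_prefix.mpr hpre)
  · have hb : (PySem.List.slice w none (some 3) == "woo".toList) = true := by
      rcases hx : (PySem.List.slice w none (some 3) == "woo".toList) with _ | _
      · rw [hx, Bool.false_and] at _h3; cases _h3
      · rfl
    have hsl := eq_of_beq hb
    rw [pv_slice_take w 3 (by norm_num)] at hsl
    have hpre : "woo".toList <+: w := List.prefix_iff_eq_take.mpr hsl.symm
    exact pvReplace1_lt w _ (by decide) (List.isPrefixOf_iff_prefix.mpr hpre)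
  · have hb : (PySem.List.slice w none (some 2) == "ma".toList) = true := by
      rcases hx : (PySem.List.slice w none (some 2) == "ma".toList) with _ | _
      · rw [hx, Bool.false_and] at _h4; cases _h4
      · rfl
    have hsl := eq_of_beq hb
    rw [pv_slice_take w 2 (by norm_num)] at hsl
    have hpre : "ma".toList <+: w := List.prefix_iff_eq_take.mpr hsl.symm
    exact pvReplace1_lt w _ (by decide) (List.isPrefixOf_iff_prefix.mpr hpre)

def checkBabbling (word : String) (previousWord : String) : Int :=
  if (pvLoopA word.toList previousWord).length == 0 then 1 else 0

-- ===== PORT B =====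
def pvToks : List (List Char) := [['a','y','a'], ['y','e'], ['w','o','o'], ['m','a']]

def pvTokenize : List Char → Option (List (List Char))
  | [] => some []
  | c :: rest =>
    match h : pvToks.find? (fun t => t.isPrefixOf (c :: rest)) with
    | none => none
    | some t => (pvTokenize ((c :: rest).drop t.length)).map (fun s => t :: s)
termination_by w => w.length
decreasing_by
  have hm : t ∈ pvToks := List.mem_of_find?_eq_some h
  have hl : 0 < t.length := by
    simp only [pvToks, List.mem_cons, List.not_mem_nil, or_false] at hm
    rcases hm with rfl | rfl | rfl | rfl <;> decide
  simp only [List.length_drop, List.length_cons]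
  omega

def checkBabbling_alt (word : String) (previousWord : String) : Int :=
  match pvTokenize word.toList with
  | none => 0
  | some seq =>
    if (seq.zip seq.tail).any (fun p => p.1 == p.2) then 0
    else match seq with
      | [] => 1
      | t :: _ => if t == previousWord.toList then 0 else 1


-- ===== PRECONDITION & SPEC =====
def Spec_checkBabbling (word : String) (previousWord : String) (out : Int) : Prop := out = checkBabbling_alt word previousWord
instance (word : String) (previousWord : String) (out : Int) : Decidable (Spec_checkBabbling word previousWord out) := by unfold Spec_checkBabbling; infer_instance

-- ===== CLAIM (what is proved, stated in full; the proofs are below) =====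
def Claim_equal_checkBabbling : Prop := ∀ (word : String) (previousWord : String), Dom_checkBabbling word previousWord → Spec_checkBabbling word previousWord (checkBabbling word previousWord)

-- ===== LEMMAS AND PROOFS =====
def pvAlt (w : List Char) (prev : String) : Int :=
  match pvTokenize w with
  | none => 0
  | some seq =>
    if (seq.zip seq.tail).any (fun p => p.1 == p.2) then 0
    else match seq with
      | [] => 1
      | t :: _ => if t == prev.toList then 0 else 1

theorem pvAlt_spec (word prev : String) : checkBabbling_alt word prev = pvAlt word.toList prev := rfl

theorem pvStr_inj {s t : String} (h : s.toList = t.toList) : s = t := by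
  exact String.toList_inj.mp h

theorem loopA_of_cond_false (w : List Char) (prev : String) (h : pvCondA w prev = false) :
    pvLoopA w prev = w := by
  have h' : ¬ (pvCondA w prev = true) := by simp [h]
  rw [pvLoopA.eq_def, if_neg h']

theorem cond_false_of_no_tok (w : List Char) (prev : String)
    (h1 : w.take 3 ≠ ['a','y','a']) (h2 : w.take 2 ≠ ['y','e'])
    (h3 : w.take 3 ≠ ['w','o','o']) (h4 : w.take 2 ≠ ['m','a']) :
    pvCondA w prev = false := by
  unfold pvCondA
  rw [pv_slice_take w 3 (by norm_num), pv_slice_take w 2 (by norm_num)]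
  simp [h1, h2, h3, h4]

theorem cond_stuck_aya (r : List Char) : pvCondA ('a'::'y'::'a'::r) "aya" = false := by
  unfold pvCondA
  rw [pv_slice_take _ 3 (by norm_num), pv_slice_take _ 2 (by norm_num)]
  simp
theorem cond_stuck_ye (r : List Char) : pvCondA ('y'::'e'::r) "ye" = false := by
  unfold pvCondA
  rw [pv_slice_take _ 3 (by norm_num), pv_slice_take _ 2 (by norm_num)]
  simp [List.take]
theorem cond_stuck_woo (r : List Char) : pvCondA ('w'::'o'::'o'::r) "woo" = false := by
  unfold pvCondA
  rw [pv_slice_take _ 3 (by norm_num), pv_slice_take _ 2 (by norm_num)]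
  simp
theorem cond_stuck_ma (r : List Char) : pvCondA ('m'::'a'::r) "ma" = false := by
  unfold pvCondA
  rw [pv_slice_take _ 3 (by norm_num), pv_slice_take _ 2 (by norm_num)]
  simp [List.take]

theorem loopA_step_aya (r : List Char) (prev : String) (hp : prev ≠ "aya") :
    pvLoopA ('a'::'y'::'a'::r) prev = pvLoopA r "aya" := by
  have h1 : (PySem.List.slice ('a'::'y'::'a'::r) none (some 3) == "aya".toList && prev != "aya") = true := by
    rw [pv_slice_take _ 3 (by norm_num)]
    simp [hp]
  have hcond : pvCondA ('a'::'y'::'a'::r) prev = true := by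
    unfold pvCondA; rw [h1]; rfl
  have hrep : pvReplace1 ('a'::'y'::'a'::r) "aya".toList = r := by
    rw [show "aya".toList = ['a','y','a'] from rfl]
    simp [pvReplace1, List.isPrefixOf]
  rw [pvLoopA.eq_def, if_pos hcond, dif_pos h1, hrep]

theorem loopA_step_ye (r : List Char) (prev : String) (hp : prev ≠ "ye") :
    pvLoopA ('y'::'e'::r) prev = pvLoopA r "ye" := by
  have hna : ¬ ((PySem.List.slice ('y'::'e'::r) none (some 3) == "aya".toList && prev != "aya") = true) := by
    rw [pv_slice_take _ 3 (by norm_num)]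
    simp [List.take]
  have h2 : (PySem.List.slice ('y'::'e'::r) none (some 2) == "ye".toList && prev != "ye") = true := by
    rw [pv_slice_take _ 2 (by norm_num)]
    simp [List.take, hp]
  have hcond : pvCondA ('y'::'e'::r) prev = true := by
    unfold pvCondA; rw [h2]; simp
  have hrep : pvReplace1 ('y'::'e'::r) "ye".toList = r := by
    rw [show "ye".toList = ['y','e'] from rfl]
    simp [pvReplace1, List.isPrefixOf]
  rw [pvLoopA.eq_def, if_pos hcond, dif_neg hna, dif_pos h2, hrep]

theorem loopA_step_woo (r : List Char) (prev : String) (hp : prev ≠ "woo") :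
    pvLoopA ('w'::'o'::'o'::r) prev = pvLoopA r "woo" := by
  have hna : ¬ ((PySem.List.slice ('w'::'o'::'o'::r) none (some 3) == "aya".toList && prev != "aya") = true) := by
    rw [pv_slice_take _ 3 (by norm_num)]; simp
  have hnye : ¬ ((PySem.List.slice ('w'::'o'::'o'::r) none (some 2) == "ye".toList && prev != "ye") = true) := by
    rw [pv_slice_take _ 2 (by norm_num)]; simp
  have h3 : (PySem.List.slice ('w'::'o'::'o'::r) none (some 3) == "woo".toList && prev != "woo") = true := by
    rw [pv_slice_take _ 3 (by norm_num)]; simp [hp]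
  have hcond : pvCondA ('w'::'o'::'o'::r) prev = true := by
    unfold pvCondA; rw [h3]; simp
  have hrep : pvReplace1 ('w'::'o'::'o'::r) "woo".toList = r := by
    rw [show "woo".toList = ['w','o','o'] from rfl]
    simp [pvReplace1, List.isPrefixOf]
  rw [pvLoopA.eq_def, if_pos hcond, dif_neg hna, dif_neg hnye, dif_pos h3, hrep]

theorem loopA_step_ma (r : List Char) (prev : String) (hp : prev ≠ "ma") :
    pvLoopA ('m'::'a'::r) prev = pvLoopA r "ma" := by
  have hna : ¬ ((PySem.List.slice ('m'::'a'::r) none (some 3) == "aya".toList && prev != "aya") = true) := by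
    rw [pv_slice_take _ 3 (by norm_num)]; simp [List.take]
  have hnye : ¬ ((PySem.List.slice ('m'::'a'::r) none (some 2) == "ye".toList && prev != "ye") = true) := by
    rw [pv_slice_take _ 2 (by norm_num)]; simp [List.take]
  have hnwoo : ¬ ((PySem.List.slice ('m'::'a'::r) none (some 3) == "woo".toList && prev != "woo") = true) := by
    rw [pv_slice_take _ 3 (by norm_num)]; simp [List.take]
  have h4 : (PySem.List.slice ('m'::'a'::r) none (some 2) == "ma".toList && prev != "ma") = true := by
    rw [pv_slice_take _ 2 (by norm_num)]; simp [List.take, hp]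
  have hcond : pvCondA ('m'::'a'::r) prev = true := by
    unfold pvCondA; rw [h4]; simp
  have hrep : pvReplace1 ('m'::'a'::r) "ma".toList = r := by
    rw [show "ma".toList = ['m','a'] from rfl]
    simp [pvReplace1, List.isPrefixOf]
  rw [pvLoopA.eq_def, if_pos hcond, dif_neg hna, dif_neg hnye, dif_neg hnwoo, dif_pos h4, hrep]

theorem tokenize_nil : pvTokenize [] = some [] := by
  rw [pvTokenize.eq_def]

theorem tokenize_aya (r : List Char) :
    pvTokenize ('a'::'y'::'a'::r) = (pvTokenize r).map (fun s => ['a','y','a'] :: s) := by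
  have hf : pvToks.find? (fun t => t.isPrefixOf ('a'::'y'::'a'::r)) = some ['a','y','a'] := by
    simp [pvToks, List.isPrefixOf]
  rw [pvTokenize.eq_def]
  split
  · rename_i h; simp at h
  · rename_i c t h
    injection h with hc ht
    subst hc
    subst ht
    split
    · rename_i h'; rw [hf] at h'; cases h'
    · rename_i t1 h'
      rw [hf] at h'
      injection h' with h'
      subst h'
      simp

theorem tokenize_ye (r : List Char) :
    pvTokenize ('y'::'e'::r) = (pvTokenize r).map (fun s => ['y','e'] :: s) := by
  have hf : pvToks.find? (fun t => t.isPrefixOf ('y'::'e'::r)) = some ['y','e'] := by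
    simp [pvToks, List.isPrefixOf]
  rw [pvTokenize.eq_def]
  split
  · rename_i h; simp at h
  · rename_i c t h
    injection h with hc ht
    subst hc
    subst ht
    split
    · rename_i h'; rw [hf] at h'; cases h'
    · rename_i t1 h'
      rw [hf] at h'
      injection h' with h'
      subst h'
      simp

theorem tokenize_woo (r : List Char) :
    pvTokenize ('w'::'o'::'o'::r) = (pvTokenize r).map (fun s => ['w','o','o'] :: s) := by
  have hf : pvToks.find? (fun t => t.isPrefixOf ('w'::'o'::'o'::r)) = some ['w','o','o'] := by
    simp [pvToks, List.isPrefixOf]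
  rw [pvTokenize.eq_def]
  split
  · rename_i h; simp at h
  · rename_i c t h
    injection h with hc ht
    subst hc
    subst ht
    split
    · rename_i h'; rw [hf] at h'; cases h'
    · rename_i t1 h'
      rw [hf] at h'
      injection h' with h'
      subst h'
      simp

theorem tokenize_ma (r : List Char) :
    pvTokenize ('m'::'a'::r) = (pvTokenize r).map (fun s => ['m','a'] :: s) := by
  have hf : pvToks.find? (fun t => t.isPrefixOf ('m'::'a'::r)) = some ['m','a'] := by
    simp [pvToks, List.isPrefixOf]
  rw [pvTokenize.eq_def]
  split
  · rename_i h; simp at h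
  · rename_i c t h
    injection h with hc ht
    subst hc
    subst ht
    split
    · rename_i h'; rw [hf] at h'; cases h'
    · rename_i t1 h'
      rw [hf] at h'
      injection h' with h'
      subst h'
      simp

theorem tokenize_none (c : Char) (rest : List Char)
    (h1 : (c::rest).take 3 ≠ ['a','y','a']) (h2 : (c::rest).take 2 ≠ ['y','e'])
    (h3 : (c::rest).take 3 ≠ ['w','o','o']) (h4 : (c::rest).take 2 ≠ ['m','a']) :
    pvTokenize (c::rest) = none := by
  have hf : pvToks.find? (fun t => t.isPrefixOf (c::rest)) = none := by
    rw [List.find?_eq_none]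
    intro t ht
    simp only [pvToks, List.mem_cons, List.not_mem_nil, or_false] at ht
    rcases ht with rfl | rfl | rfl | rfl <;>
      · simp only [List.isPrefixOf_iff_prefix, List.prefix_iff_eq_take]
        intro hh
        first
        | exact h1 hh.symm
        | exact h2 hh.symm
        | exact h3 hh.symm
        | exact h4 hh.symm
  rw [pvTokenize.eq_def]
  split
  · rename_i h; simp at h
  · rename_i c' t h
    injection h with hc ht
    subst hc
    subst ht
    split
    · rfl
    · rename_i t1 h'; rw [hf] at h'; cases h' 

theorem pvAlt_none (w : List Char) (prev : String) (h : pvTokenize w = none) : pvAlt w prev = 0 := by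
  unfold pvAlt; rw [h]

theorem pvAlt_nil (prev : String) : pvAlt [] prev = 1 := by
  unfold pvAlt; rw [tokenize_nil]; simp

theorem pvAlt_stuck (w r : List Char) (tk : List Char) (prev : String)
    (hT : pvTokenize w = (pvTokenize r).map (fun s => tk :: s))
    (heq : tk = prev.toList) : pvAlt w prev = 0 := by
  unfold pvAlt
  rw [hT]
  cases pvTokenize r with
  | none => rfl
  | some s => simp [heq]

theorem pvAlt_shift (w r : List Char) (tk : List Char) (prev next : String)
    (hT : pvTokenize w = (pvTokenize r).map (fun s => tk :: s))
    (hne : tk ≠ prev.toList) (hnx : next.toList = tk) :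
    pvAlt w prev = pvAlt r next := by
  unfold pvAlt
  rw [hT]
  cases pvTokenize r with
  | none => rfl
  | some s =>
    cases s with
    | nil => simp [hne]
    | cons t2 s2 =>
      simp only [Option.map_some, List.tail_cons, List.zip_cons_cons, List.any_cons]
      have hpf : (tk == prev.toList) = false := by simp [hne]
      rw [hnx]
      by_cases e1 : tk = t2
      · simp [e1]
      · have l1 : (tk == t2) = false := by simp [e1]
        have l2 : (t2 == tk) = false := by simp [Ne.symm e1]
        rw [l1, Bool.false_or]
        simp [l2, hpf]

theorem main_lemma : ∀ (n : Nat) (w : List Char), w.length ≤ n → ∀ (prev : String),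
    (if (pvLoopA w prev).length == 0 then (1 : Int) else 0) = pvAlt w prev := by
  intro n
  induction n with
  | zero =>
    intro w hw prev
    have hnil : w = [] := List.eq_nil_of_length_eq_zero (Nat.le_zero.mp hw)
    subst hnil
    rw [loopA_of_cond_false _ _ (cond_false_of_no_tok _ _ (by decide) (by decide) (by decide) (by decide))]
    rw [pvAlt_nil]
    rfl
  | succ n ih =>
    intro w hw prev
    by_cases h1 : w.take 3 = ['a','y','a']
    · obtain ⟨r, rfl⟩ : ∃ r, w = 'a'::'y'::'a'::r := by
        have hp : ['a','y','a'] <+: w := by rw [List.prefix_iff_eq_take]; exact h1.symm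
        obtain ⟨r, hr⟩ := hp
        exact ⟨r, hr.symm⟩
      by_cases hp : prev = "aya"
      · subst hp
        rw [loopA_of_cond_false _ _ (cond_stuck_aya r)]
        rw [pvAlt_stuck _ r ['a','y','a'] _ (tokenize_aya r) rfl]
        simp
      · have hlen : r.length ≤ n := by simp at hw; omega
        have hne : (['a','y','a'] : List Char) ≠ prev.toList := by
          exact fun hh => hp (pvStr_inj (t := "aya") hh.symm)
        rw [loopA_step_aya r prev hp, ih r hlen "aya",
            pvAlt_shift _ r ['a','y','a'] prev "aya" (tokenize_aya r) hne rfl]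
    · by_cases h2 : w.take 2 = ['y','e']
      · obtain ⟨r, rfl⟩ : ∃ r, w = 'y'::'e'::r := by
          have hp : ['y','e'] <+: w := by rw [List.prefix_iff_eq_take]; exact h2.symm
          obtain ⟨r, hr⟩ := hp
          exact ⟨r, hr.symm⟩
        by_cases hp : prev = "ye"
        · subst hp
          rw [loopA_of_cond_false _ _ (cond_stuck_ye r)]
          rw [pvAlt_stuck _ r ['y','e'] _ (tokenize_ye r) rfl]
          simp
        · have hlen : r.length ≤ n := by simp at hw; omega
          have hne : (['y','e'] : List Char) ≠ prev.toList := by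
            exact fun hh => hp (pvStr_inj (t := "ye") hh.symm)
          rw [loopA_step_ye r prev hp, ih r hlen "ye",
              pvAlt_shift _ r ['y','e'] prev "ye" (tokenize_ye r) hne rfl]
      · by_cases h3 : w.take 3 = ['w','o','o']
        · obtain ⟨r, rfl⟩ : ∃ r, w = 'w'::'o'::'o'::r := by
            have hp : ['w','o','o'] <+: w := by rw [List.prefix_iff_eq_take]; exact h3.symm
            obtain ⟨r, hr⟩ := hp
            exact ⟨r, hr.symm⟩
          by_cases hp : prev = "woo"
          · subst hp
            rw [loopA_of_cond_false _ _ (cond_stuck_woo r)]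
            rw [pvAlt_stuck _ r ['w','o','o'] _ (tokenize_woo r) rfl]
            simp
          · have hlen : r.length ≤ n := by simp at hw; omega
            have hne : (['w','o','o'] : List Char) ≠ prev.toList := by
              exact fun hh => hp (pvStr_inj (t := "woo") hh.symm)
            rw [loopA_step_woo r prev hp, ih r hlen "woo",
                pvAlt_shift _ r ['w','o','o'] prev "woo" (tokenize_woo r) hne rfl]
        · by_cases h4 : w.take 2 = ['m','a']
          · obtain ⟨r, rfl⟩ : ∃ r, w = 'm'::'a'::r := by
              have hp : ['m','a'] <+: w := by rw [List.prefix_iff_eq_take]; exact h4.symm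
              obtain ⟨r, hr⟩ := hp
              exact ⟨r, hr.symm⟩
            by_cases hp : prev = "ma"
            · subst hp
              rw [loopA_of_cond_false _ _ (cond_stuck_ma r)]
              rw [pvAlt_stuck _ r ['m','a'] _ (tokenize_ma r) rfl]
              simp
            · have hlen : r.length ≤ n := by simp at hw; omega
              have hne : (['m','a'] : List Char) ≠ prev.toList := by
                exact fun hh => hp (pvStr_inj (t := "ma") hh.symm)
              rw [loopA_step_ma r prev hp, ih r hlen "ma",
                  pvAlt_shift _ r ['m','a'] prev "ma" (tokenize_ma r) hne rfl]
          · cases w with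
            | nil =>
              rw [loopA_of_cond_false _ _ (cond_false_of_no_tok _ _ (by decide) (by decide) (by decide) (by decide))]
              rw [pvAlt_nil]
              rfl
            | cons c rest =>
              rw [loopA_of_cond_false _ _ (cond_false_of_no_tok _ _ h1 h2 h3 h4)]
              rw [pvAlt_none _ _ (tokenize_none c rest h1 h2 h3 h4)]
              simp

theorem port_eq (word prev : String) : checkBabbling word prev = checkBabbling_alt word prev := by
  rw [pvAlt_spec, checkBabbling]
  exact main_lemma word.toList.length word.toList le_rfl prev

-- ===== VERDICT (by name: the statement is the Claim_ definition above) =====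
theorem checkBabbling_spec : Claim_equal_checkBabbling := by
  intro word previousWord _
  show checkBabbling word previousWord = checkBabbling_alt word previousWord
  exact port_eq word previousWord
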